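-- pv_equiv track=rewrite | github.com/ERGA-consortium/tutorials | assembly/rapid-curation/rapid_pretext2tpf_XL.py | name_haps
-- ===== SOURCE A (Python) =====
-- def name_haps(haptpfchunklens):
--
--
-- 	sizes=[]
-- 	named_haps={}
-- 	iteration=0
-- 	for k,size in haptpfchunklens.items():
-- 		if size not in sizes:
-- 			sizes.append(size)
-- 	sortedsizes=sorted(sizes, reverse=True)
-- 	for size in sortedsizes:
-- 		for k,v in haptpfchunklens.items():
-- 			if size==v:
-- 				iteration+=1
-- 				name="H_"+str(iteration)
-- 				named_haps[k]=name
--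
--
-- 	return named_haps
-- ===== SOURCE B (Python) =====
-- def name_haps(haptpfchunklens):
-- 	ordered = sorted(haptpfchunklens.items(), key=lambda kv: kv[1], reverse=True)
-- 	return {k: "H_" + str(i) for i, (k, _) in enumerate(ordered, 1)}
-- ===== Notes on version B (the rewrite author's own statement) =====
-- stated objective: simpler
-- what changed: Instead of deduplicating sizes and re-scanning the whole dict once per distinct size, B stably sorts the items by size descending once and names them in a single enumerated pass.
import Mathlib
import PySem

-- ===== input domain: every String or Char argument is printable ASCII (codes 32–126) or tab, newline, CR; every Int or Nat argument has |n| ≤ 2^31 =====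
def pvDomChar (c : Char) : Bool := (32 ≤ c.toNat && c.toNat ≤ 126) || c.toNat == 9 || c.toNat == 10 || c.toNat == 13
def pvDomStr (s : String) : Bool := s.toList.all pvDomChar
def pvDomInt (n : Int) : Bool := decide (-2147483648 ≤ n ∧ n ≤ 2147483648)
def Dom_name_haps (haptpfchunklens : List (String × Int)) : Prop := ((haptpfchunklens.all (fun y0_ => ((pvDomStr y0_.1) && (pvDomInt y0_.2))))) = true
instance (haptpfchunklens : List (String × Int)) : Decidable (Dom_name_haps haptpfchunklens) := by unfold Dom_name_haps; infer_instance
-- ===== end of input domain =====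

-- B replaces A's per-distinct-size rescans of the dict by one stable sort of the items by size
-- descending and a single enumerated naming pass (objective: simpler).


-- ===== PORT A =====
def nhStep (st : PySem.Dict String String × Int) (kv : String × Int) :
    PySem.Dict String String × Int :=
  (st.1.insert kv.1 ("H_" ++ PySem.Int.toStr (st.2 + 1)), st.2 + 1)

def name_haps (haptpfchunklens : List (String × Int)) : List (String × String) :=
  let sizes : List Int :=
    haptpfchunklens.foldl (fun sizes kv => if sizes.contains kv.2 then sizes else sizes ++ [kv.2]) []
  let sortedsizes := PySem.List.sorted sizes (fun x => x) true
  (sortedsizes.foldl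
      (fun st size =>
        haptpfchunklens.foldl (fun st kv => if size == kv.2 then nhStep st kv else st) st)
      (PySem.Dict.empty, 0)).1.items

-- ===== PORT B =====
def name_haps_alt (haptpfchunklens : List (String × Int)) : List (String × String) :=
  let ordered := PySem.List.sorted haptpfchunklens (fun kv => kv.2) true
  ((PySem.List.enumerate ordered 1).foldl
      (fun d p => d.insert p.2.1 ("H_" ++ PySem.Int.toStr p.1))
      PySem.Dict.empty).items


-- ===== PRECONDITION & SPEC =====
def Spec_name_haps (haptpfchunklens : List (String × Int)) (out : List (String × String)) : Prop := out = name_haps_alt haptpfchunklens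
instance (haptpfchunklens : List (String × Int)) (out : List (String × String)) : Decidable (Spec_name_haps haptpfchunklens out) := by unfold Spec_name_haps; infer_instance

-- ===== CLAIM (what is proved, stated in full; the proofs are below) =====
def Claim_equal_name_haps : Prop := ∀ (haptpfchunklens : List (String × Int)), Dom_name_haps haptpfchunklens → Spec_name_haps haptpfchunklens (name_haps haptpfchunklens)

-- ===== LEMMAS AND PROOFS =====

theorem insertBy_cons {α : Type} (before : α → α → Bool) (x y : α) (ys : List α) :
    PySem.List.insertBy before x (y::ys) =
      if before x y then x::y::ys else y :: PySem.List.insertBy before x ys := by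
  simp [PySem.List.insertBy]

theorem insertBy_append_not {α : Type} (before : α → α → Bool) (x : α) (as bs : List α)
    (h : ∀ y ∈ as, before x y = false) :
    PySem.List.insertBy before x (as ++ bs) = as ++ PySem.List.insertBy before x bs := by
  induction as with
  | nil => simp
  | cons a as ih =>
      simp only [List.cons_append, insertBy_cons, h a (by simp)]
      simp only [Bool.false_eq_true, if_false, List.cons.injEq, true_and]
      exact ih (fun y hy => h y (by simp [hy]))

theorem insertBy_all_before {α : Type} (before : α → α → Bool) (x : α) (l : List α)
    (h : ∀ y ∈ l, before x y = true) :
    PySem.List.insertBy before x l = x :: l := by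
  cases l with
  | nil => rfl
  | cons a as => simp [insertBy_cons, h a (by simp)]

def nhGroup (h : List (String × Int)) (s : Int) : List (String × Int) :=
  h.filter (fun kv => s == kv.2)

theorem mem_nhGroup_snd {h : List (String × Int)} {s : Int} {kv : String × Int}
    (hm : kv ∈ nhGroup h s) : kv.2 = s := by
  have := List.of_mem_filter hm
  simp only [beq_iff_eq] at this
  omega

-- G1
theorem insertBy_flatMap_mem (ks : List Int) (g : Int → List (String × Int))
    (hg : ∀ s, ∀ kv ∈ g s, kv.2 = s)
    (hks : ks.Pairwise (fun a b => b < a)) (x : String × Int) (hx : x.2 ∈ ks) :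
    PySem.List.insertBy (fun a b => decide (b.2 < a.2)) x (ks.flatMap g)
      = ks.flatMap (fun s => if s = x.2 then g s ++ [x] else g s) := by
  induction ks with
  | nil => simp at hx
  | cons s rest ih =>
      have hrest : ∀ r ∈ rest, r < s := (List.pairwise_cons.mp hks).1
      by_cases hsx : s = x.2
      · have hnot : ∀ y ∈ g s, (fun a b : String × Int => decide (b.2 < a.2)) x y = false := by
          intro y hy
          have := hg s y hy
          simp [this, hsx]
        have hall : ∀ y ∈ rest.flatMap g,
            (fun a b : String × Int => decide (b.2 < a.2)) x y = true := by
          intro y hy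
          obtain ⟨r, hr, hyy⟩ := List.mem_flatMap.mp hy
          have h1 := hg r y hyy
          have h2 := hrest r hr
          simp [h1]; omega
        have hcongr : rest.flatMap (fun t => if t = x.2 then g t ++ [x] else g t)
            = rest.flatMap g := by
          apply List.flatMap_congr
          intro t ht
          have := hrest t ht
          have : t ≠ x.2 := by omega
          simp [this]
        rw [List.flatMap_cons, insertBy_append_not _ _ _ _ hnot,
            insertBy_all_before _ _ _ hall, List.flatMap_cons, hcongr]
        simp [hsx]
      · have hxrest : x.2 ∈ rest := by
          rcases List.mem_cons.mp hx with h | h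
          · exact absurd h.symm hsx
          · exact h
        have hxs : x.2 < s := hrest _ hxrest
        have hnot : ∀ y ∈ g s, (fun a b : String × Int => decide (b.2 < a.2)) x y = false := by
          intro y hy
          have := hg s y hy
          simp [this]; omega
        rw [List.flatMap_cons, insertBy_append_not _ _ _ _ hnot,
            ih (List.pairwise_cons.mp hks).2 hxrest, List.flatMap_cons]
        simp [hsx]

-- G2: inserting x with a NEW size k = x.2 matches inserting k into the key list
theorem insertBy_flatMap_new (ks : List Int) (g : Int → List (String × Int))
    (hg : ∀ s, ∀ kv ∈ g s, kv.2 = s)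
    (hks : ks.Pairwise (fun a b => b < a)) (x : String × Int) (hx : x.2 ∉ ks) :
    PySem.List.insertBy (fun a b : String × Int => decide (b.2 < a.2)) x (ks.flatMap g)
      = (PySem.List.insertBy (fun a b : Int => decide (b < a)) x.2 ks).flatMap
          (fun s => if s = x.2 then [x] else g s) := by
  induction ks with
  | nil => simp [PySem.List.insertBy]
  | cons s rest ih =>
      have hrest : ∀ r ∈ rest, r < s := (List.pairwise_cons.mp hks).1
      have hsx : s ≠ x.2 := fun h => hx (by simp [h])
      rw [insertBy_cons (fun a b : Int => decide (b < a)) x.2 s rest]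
      by_cases hlt : s < x.2
      · have hall : ∀ y ∈ (s :: rest).flatMap g,
            (fun a b : String × Int => decide (b.2 < a.2)) x y = true := by
          intro y hy
          obtain ⟨r, hr, hyy⟩ := List.mem_flatMap.mp hy
          have h1 := hg r y hyy
          have h2 : r ≤ s := by
            rcases List.mem_cons.mp hr with h | h
            · omega
            · have := hrest r h; omega
          simp [h1]; omega
        rw [insertBy_all_before _ _ _ hall]
        have hcongr : (s :: rest).flatMap (fun t => if t = x.2 then [x] else g t)
            = (s :: rest).flatMap g := by
          apply List.flatMap_congr
          intro t ht
          have : t ≠ x.2 := by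
            rcases List.mem_cons.mp ht with h | h
            · omega
            · have := hrest t h; omega
          simp [this]
        simp only [hlt, decide_true, if_true, List.flatMap_cons, hcongr]
        simp
      · have hnot : ∀ y ∈ g s, (fun a b : String × Int => decide (b.2 < a.2)) x y = false := by
          intro y hy
          have := hg s y hy
          simp [this]; omega
        have hxr : x.2 ∉ rest := fun h => hx (by simp [h])
        rw [List.flatMap_cons, insertBy_append_not _ _ _ _ hnot,
            ih (List.pairwise_cons.mp hks).2 hxr]
        simp [hlt, hsx]

def nhSizesFrom (h : List (String × Int)) (acc : List Int) : List Int :=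
  h.foldl (fun sizes kv => if sizes.contains kv.2 then sizes else sizes ++ [kv.2]) acc

theorem mem_nhSizesFrom (h : List (String × Int)) (acc : List Int) (s : Int) :
    s ∈ nhSizesFrom h acc ↔ s ∈ acc ∨ s ∈ h.map (·.2) := by
  induction h generalizing acc with
  | nil => simp [nhSizesFrom]
  | cons kv t ih =>
      simp only [nhSizesFrom, List.foldl_cons] at *
      rw [ih]
      by_cases hc : acc.contains kv.2
      · simp only [hc, if_true]
        have : kv.2 ∈ acc := by simpa using hc
        aesop
      · simp only [hc, Bool.false_eq_true, if_false]
        aesop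

theorem nodup_nhSizesFrom (h : List (String × Int)) (acc : List Int) (hn : acc.Nodup) :
    (nhSizesFrom h acc).Nodup := by
  induction h generalizing acc with
  | nil => simpa [nhSizesFrom]
  | cons kv t ih =>
      simp only [nhSizesFrom, List.foldl_cons] at *
      by_cases hc : kv.2 ∈ acc
      · simpa [hc] using ih acc hn
      · rw [if_neg (by simpa using hc)]
        apply ih
        rw [List.nodup_append]
        refine ⟨hn, List.nodup_singleton _, ?_⟩
        intro a ha b hb
        simp only [List.mem_singleton] at hb
        rw [hb]
        intro h
        exact hc (h ▸ ha)

theorem nhGroup_append (h : List (String × Int)) (x : String × Int) (s : Int) :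
    nhGroup (h ++ [x]) s = nhGroup h s ++ if s = x.2 then [x] else [] := by
  simp only [nhGroup, List.filter_append]
  by_cases hs : s = x.2 <;> simp [hs]

theorem sorted_append_singleton (h : List (String × Int)) (x : String × Int) :
    PySem.List.sorted (h ++ [x]) (fun kv => kv.2) true
      = PySem.List.insertBy (fun a b : String × Int => decide (b.2 < a.2)) x
          (PySem.List.sorted h (fun kv => kv.2) true) := by
  rw [PySem.List.sorted_rev_eq_foldl_insertBy, List.foldl_append]
  simp only [List.foldl_cons, List.foldl_nil]
  rw [← PySem.List.sorted_rev_eq_foldl_insertBy]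

theorem sortedInt_append_singleton (S : List Int) (k : Int) :
    PySem.List.sorted (S ++ [k]) (fun x => x) true
      = PySem.List.insertBy (fun a b : Int => decide (b < a)) k
          (PySem.List.sorted S (fun x => x) true) := by
  rw [PySem.List.sorted_rev_eq_foldl_insertBy, List.foldl_append]
  simp only [List.foldl_cons, List.foldl_nil]
  rw [← PySem.List.sorted_rev_eq_foldl_insertBy]

theorem sorted_eq_groups (h : List (String × Int)) :
    PySem.List.sorted h (fun kv => kv.2) true
      = (PySem.List.sorted (nhSizesFrom h []) (fun x => x) true).flatMap (nhGroup h) := by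
  induction h using List.reverseRecOn with
  | nil => rfl
  | append_singleton h x ih =>
      have hdesc : (PySem.List.sorted (nhSizesFrom h []) (fun x => x) true).Pairwise
          (fun a b => b < a) := by
        have h1 := PySem.List.sorted_pairwise_rev (nhSizesFrom h []) (fun x => x)
        have h2 : (PySem.List.sorted (nhSizesFrom h []) (fun x => x) true).Nodup :=
          ((PySem.List.sorted_perm (nhSizesFrom h []) (fun x => x) true).nodup_iff).mpr
            (nodup_nhSizesFrom h [] (by simp))
        exact (List.Pairwise.and h1 h2).imp (fun hp => by omega)
      have hg : ∀ s, ∀ kv ∈ nhGroup h s, kv.2 = s := fun s kv hm => mem_nhGroup_snd hm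
      have hsizes : nhSizesFrom (h ++ [x]) []
          = if (nhSizesFrom h []).contains x.2 then nhSizesFrom h []
            else nhSizesFrom h [] ++ [x.2] := by
        simp only [nhSizesFrom, List.foldl_append, List.foldl_cons, List.foldl_nil]
      rw [sorted_append_singleton, ih]
      by_cases hc : x.2 ∈ nhSizesFrom h []
      · rw [insertBy_flatMap_mem _ _ hg hdesc x
              ((PySem.List.mem_sorted _ _ _ _).mpr hc)]
        rw [hsizes, if_pos (by simpa using hc)]
        apply List.flatMap_congr
        intro t ht
        rw [nhGroup_append]
        by_cases hts : t = x.2 <;> simp [hts]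
      · rw [insertBy_flatMap_new _ _ hg hdesc x
              (fun hm => hc ((PySem.List.mem_sorted _ _ _ _).mp hm))]
        rw [hsizes, if_neg (by simpa using hc), sortedInt_append_singleton]
        apply List.flatMap_congr
        intro t ht
        rcases (PySem.List.mem_insertBy _ _ _ _).mp ht with heq | htk
        · subst heq
          have hempty : nhGroup h x.2 = [] := by
            rw [nhGroup, List.filter_eq_nil_iff]
            intro kv hkv
            simp only [beq_iff_eq]
            intro he
            exact hc ((mem_nhSizesFrom h [] x.2).mpr (Or.inr (by
              simp only [List.mem_map]
              exact ⟨kv, hkv, he.symm⟩)))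
          rw [nhGroup_append, hempty, if_pos rfl]
          simp
        · have htne : t ≠ x.2 := by
            intro he
            exact hc (he ▸ ((PySem.List.mem_sorted _ _ _ _).mp htk))
          rw [nhGroup_append, if_neg htne]
          simp [htne]

theorem nameA_eq (h : List (String × Int)) :
    name_haps h
      = ((PySem.List.sorted h (fun kv => kv.2) true).foldl nhStep (PySem.Dict.empty, 0)).1.items := by
  unfold name_haps
  rw [sorted_eq_groups h]
  simp only [PySem.List.foldl_if_eq_foldl_filter, List.foldl_flatMap]
  rfl

theorem enum_fold (l : List (String × Int)) (d : PySem.Dict String String) (n : Int) :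
    (PySem.List.enumerate l (n + 1)).foldl
        (fun d p => d.insert p.2.1 ("H_" ++ PySem.Int.toStr p.1)) d
      = (l.foldl nhStep (d, n)).1 := by
  induction l generalizing d n with
  | nil => rfl
  | cons x xs ih =>
      rw [PySem.List.enumerate_cons, List.foldl_cons, List.foldl_cons]
      have := ih (d.insert x.1 ("H_" ++ PySem.Int.toStr (n + 1))) (n + 1)
      simpa [nhStep] using this

theorem nameB_eq (h : List (String × Int)) :
    name_haps_alt h
      = ((PySem.List.sorted h (fun kv => kv.2) true).foldl nhStep (PySem.Dict.empty, 0)).1.items := by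
  have := enum_fold (PySem.List.sorted h (fun kv => kv.2) true) PySem.Dict.empty 0
  norm_num at this
  exact congrArg PySem.Dict.items this


-- ===== VERDICT (by name: the statement is the Claim_ definition above) =====
theorem name_haps_spec : Claim_equal_name_haps := by
  intro h _
  unfold Spec_name_haps
  rw [nameA_eq, nameB_eq]
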